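-- pv_equiv track=rewrite | github.com/gaixas1/traffic-generator | src/test.py | getLastIn
-- ===== SOURCE A (Python) =====
-- def getLastIn (t):
-- 	vals = t.split('\n')
-- 	v = 0
-- 	for i in range(0, len(vals)-1):
-- 		try:
-- 			v = int(vals[i])
-- 		except:
-- 			pass
-- 	return v
-- ===== SOURCE B (Python) =====
-- def getLastIn(t):
--     vals = t.split('\n')
--     for i in range(len(vals) - 2, -1, -1):
--         try:
--             return int(vals[i])
--         except ValueError:
--             pass
--     return 0
-- ===== Notes on version B (the rewrite author's own statement) =====
-- stated objective: alternative
-- what changed: Replaces A's forward pass that overwrites an accumulator with every parseable line by a backward scan that returns immediately on the first parseable line from the end (excluding the last line).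
import Mathlib
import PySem

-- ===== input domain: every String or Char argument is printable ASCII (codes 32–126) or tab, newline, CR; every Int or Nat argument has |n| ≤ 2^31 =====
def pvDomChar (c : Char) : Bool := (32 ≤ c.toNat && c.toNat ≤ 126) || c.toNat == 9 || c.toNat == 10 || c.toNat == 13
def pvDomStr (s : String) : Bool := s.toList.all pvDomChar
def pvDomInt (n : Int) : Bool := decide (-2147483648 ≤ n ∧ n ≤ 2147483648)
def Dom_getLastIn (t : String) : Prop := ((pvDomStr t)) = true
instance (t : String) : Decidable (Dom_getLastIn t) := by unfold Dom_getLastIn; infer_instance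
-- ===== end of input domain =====

-- B replaces A's forward overwrite-accumulator pass by a backward scan that returns
-- on the first parseable line from the end (excluding the last line); same values, no speed claim.

-- ===== PORT A =====
-- forward loop over range(0, len(vals)-1); v overwritten on every successful int(vals[i])
def getLastIn (t : String) : Int :=
  -- t.split('\n'): sep is the nonempty literal "\n", so split? is always some; getD [] is exact here
  let vals := (PySem.Str.split? t "\n").getD []
  (PySem.List.pyRange 0 ((vals.length : Int) - 1) 1).foldl
    (fun v i =>
      match PySem.Int.ofStr? (PySem.List.pyGetD vals i "") with
      | some n => n
      | none => v) 0

-- ===== PORT B =====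
-- backward scan: altScan vals m tries indices m-1, m-2, …, 0 and returns the first parse
def altScan (vals : List String) : Nat → Int
  | 0 => 0
  | k + 1 =>
    match PySem.Int.ofStr? (vals.getD k "") with
    | some n => n
    | none => altScan vals k

def getLastIn_alt (t : String) : Int :=
  let vals := (PySem.Str.split? t "\n").getD []
  altScan vals (vals.length - 1)

-- ===== PRECONDITION & SPEC =====
def Spec_getLastIn (t : String) (out : Int) : Prop := out = getLastIn_alt t
instance (t : String) (out : Int) : Decidable (Spec_getLastIn t out) := by unfold Spec_getLastIn; infer_instance

-- ===== CLAIM (what is proved, stated in full; the proofs are below) =====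
def Claim_equal_getLastIn : Prop := ∀ (t : String), Dom_getLastIn t → Spec_getLastIn t (getLastIn t)

-- ===== LEMMAS AND PROOFS =====

-- A's forward fold over range(0, m) computes the same value as B's backward scan from m
theorem foldl_eq_altScan (vals : List String) (m : Nat) :
    (PySem.List.pyRange 0 (m : Int) 1).foldl
      (fun v i =>
        match PySem.Int.ofStr? (PySem.List.pyGetD vals i "") with
        | some n => n
        | none => v) 0 = altScan vals m := by
  induction m with
  | zero => simp [PySem.List.pyRange_one_eq_nil, altScan]
  | succ k ih =>
    rw [show ((k + 1 : Nat) : Int) = (k : Int) + 1 by push_cast; ring,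
      PySem.List.pyRange_one_succ_right (Int.natCast_nonneg k), List.foldl_append]
    simp only [List.foldl_cons, List.foldl_nil, ih, altScan,
      PySem.List.pyGetD_natCast]

-- the body of getLastIn equals the body of getLastIn_alt, for any list of lines
theorem body_eq (vals : List String) :
    (PySem.List.pyRange 0 ((vals.length : Int) - 1) 1).foldl
      (fun v i =>
        match PySem.Int.ofStr? (PySem.List.pyGetD vals i "") with
        | some n => n
        | none => v) 0 = altScan vals (vals.length - 1) := by
  cases h : vals.length with
  | zero =>
    rw [show ((0 : Nat) : Int) - 1 = (-1 : Int) by norm_num,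
      PySem.List.pyRange_one_eq_nil (by norm_num)]
    simp [altScan]
  | succ k =>
    rw [show ((k + 1 : Nat) : Int) - 1 = (k : Int) by push_cast; ring,
      show k + 1 - 1 = k from rfl, foldl_eq_altScan]

-- ===== VERDICT (by name: the statement is the Claim_ definition above) =====
theorem getLastIn_spec : Claim_equal_getLastIn := by
  intro t _
  exact body_eq ((PySem.Str.split? t "\n").getD [])
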